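-- pv_equiv track=rewrite | github.com/ZouJoshua/nlp_server | src/apps/video_tags/classification/es_vtag_process.py | proof_tag
-- ===== SOURCE A (Python) =====
-- def proof_tag(tag, standard_tag_list):
--     """
--     将tag标准化，如video变成videos
--     :param tag:
--     :param standard_tag_list:
--     :return:
--     """
--     tag_len = tag.split(" ")
--     if len(tag_len) == 1:
--         if tag in standard_tag_list:
--             return tag + "s"
--         else:
--             return tag
--     else:
--         new_tag = ""
--         new_tmp_tag = ""
--         replace_count = 0
--         for tg in tag_len:
--             if tg in standard_tag_list:
--                 replace_count += 1
--                 new_tmp_tag += "{}s ".format(tg)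
--             else:
--                 new_tmp_tag += "{} ".format(tg)
--         if replace_count < 2:
--             new_tag = new_tmp_tag
--         else:
--             new_tag = tag
--         return new_tag.strip()
-- ===== SOURCE B (Python) =====
-- def _pluralize(words, seen, std):
--     # Recursively build the pluralized string back-to-front; return None as soon
--     # as a SECOND member word is encountered (early abort).
--     if not words:
--         return ""
--     w = words[0]
--     if w in std:
--         if seen:
--             return None
--         tail = _pluralize(words[1:], True, std)
--         return None if tail is None else w + "s " + tail
--     tail = _pluralize(words[1:], seen, std)
--     return None if tail is None else w + " " + tail
--
--
-- def proof_tag(tag, standard_tag_list):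
--     words = tag.split(" ")
--     if len(words) == 1:
--         return tag + "s" if tag in standard_tag_list else tag
--     res = _pluralize(words, False, standard_tag_list)
--     return tag.strip() if res is None else res.strip()
-- ===== Notes on version B (the rewrite author's own statement) =====
-- stated objective: alternative
-- what changed: A's iterative fused loop (accumulating a string forward while counting members, then comparing the count) is replaced by a recursive helper that builds the result back-to-front and aborts early with None the moment a second member word is seen.
import Mathlib
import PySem

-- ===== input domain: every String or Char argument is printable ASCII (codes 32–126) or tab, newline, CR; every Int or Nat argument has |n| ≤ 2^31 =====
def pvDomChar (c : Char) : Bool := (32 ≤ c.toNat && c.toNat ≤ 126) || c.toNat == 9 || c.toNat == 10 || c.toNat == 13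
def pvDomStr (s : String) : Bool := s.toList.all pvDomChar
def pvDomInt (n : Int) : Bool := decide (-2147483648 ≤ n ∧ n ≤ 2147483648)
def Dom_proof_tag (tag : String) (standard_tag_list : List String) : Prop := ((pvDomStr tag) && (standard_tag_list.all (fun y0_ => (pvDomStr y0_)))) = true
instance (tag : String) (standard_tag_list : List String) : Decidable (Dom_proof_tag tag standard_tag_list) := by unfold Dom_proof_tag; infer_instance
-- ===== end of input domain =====

-- B replaces A's fused count-and-build loop with a recursive back-to-front builder
-- that aborts early (None) on the second member word; equal to A everywhere.

-- ===== PORT A =====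
-- A: single forward loop that simultaneously counts members and accumulates "word[s] " pieces.
def proof_tag (tag : String) (standard_tag_list : List String) : String :=
  let stdc := standard_tag_list.map String.toList
  let tag_len := PySem.Chars.splitOn tag.toList [' ']
  if tag_len.length = 1 then
    if stdc.contains tag.toList then String.ofList (tag.toList ++ ['s']) else tag
  else
    let st := tag_len.foldl (fun (p : Nat × List Char) tg =>
      if stdc.contains tg then (p.1 + 1, p.2 ++ tg ++ ['s', ' '])
      else (p.1, p.2 ++ tg ++ [' '])) (0, ([] : List Char))
    let new_tag := if st.1 < 2 then st.2 else tag.toList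
    String.ofList (PySem.Chars.strip new_tag)

-- ===== PORT B =====
-- B helper: build the pluralized string back-to-front; none = a second member word was seen.
def pluralizeAux (std : List (List Char)) : List (List Char) → Bool → Option (List Char)
  | [], _ => some []
  | w :: rest, seen =>
    if std.contains w then
      if seen then none
      else
        match pluralizeAux std rest true with
        | none => none
        | some t => some (w ++ ['s', ' '] ++ t)
    else
      match pluralizeAux std rest seen with
      | none => none
      | some t => some (w ++ [' '] ++ t)

def proof_tag_alt (tag : String) (standard_tag_list : List String) : String :=
  let stdc := standard_tag_list.map String.toList
  let words := PySem.Chars.splitOn tag.toList [' ']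
  if words.length = 1 then
    if stdc.contains tag.toList then String.ofList (tag.toList ++ ['s']) else tag
  else
    match pluralizeAux stdc words false with
    | none => String.ofList (PySem.Chars.strip tag.toList)
    | some r => String.ofList (PySem.Chars.strip r)

-- ===== PRECONDITION & SPEC =====
def Spec_proof_tag (tag : String) (standard_tag_list : List String) (out : String) : Prop := out = proof_tag_alt tag standard_tag_list
instance (tag : String) (standard_tag_list : List String) (out : String) : Decidable (Spec_proof_tag tag standard_tag_list out) := by unfold Spec_proof_tag; infer_instance

-- ===== CLAIM (what is proved, stated in full; the proofs are below) =====
def Claim_equal_proof_tag : Prop := ∀ (tag : String) (standard_tag_list : List String), Dom_proof_tag tag standard_tag_list → Spec_proof_tag tag standard_tag_list (proof_tag tag standard_tag_list)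

-- ===== LEMMAS AND PROOFS =====

-- the flat string both programs (when they build) produce
def pvFlat (std : List (List Char)) (ws : List (List Char)) : List Char :=
  (ws.map (fun w => if std.contains w then w ++ ['s', ' '] else w ++ [' '])).flatten

-- A's loop computes the member count and the flat string
lemma foldl_eq_count_flat (std : List (List Char)) :
    ∀ (ws : List (List Char)) (c : Nat) (acc : List Char),
      ws.foldl (fun (p : Nat × List Char) tg =>
          if std.contains tg then (p.1 + 1, p.2 ++ tg ++ ['s', ' '])
          else (p.1, p.2 ++ tg ++ [' '])) (c, acc)
        = (c + ws.countP (fun w => std.contains w), acc ++ pvFlat std ws) := by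
  intro ws
  induction ws with
  | nil => intro c acc; simp [pvFlat]
  | cons w t ih =>
    intro c acc
    simp only [List.foldl_cons, List.countP_cons, pvFlat, List.map_cons, List.flatten_cons]
    by_cases h : w ∈ std
    · rw [if_pos (by simpa using h), ih]
      simp [pvFlat, h]
      omega
    · rw [if_neg (by simpa using h), ih]
      simp [pvFlat, h]

-- B's recursion characterised by the member count
lemma pluralizeAux_eq (std : List (List Char)) :
    ∀ (ws : List (List Char)) (seen : Bool),
      pluralizeAux std ws seen =
        if 2 ≤ ws.countP (fun w => std.contains w) + (if seen then 1 else 0) then none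
        else some (pvFlat std ws) := by
  intro ws
  induction ws with
  | nil => intro seen; cases seen <;> simp [pluralizeAux, pvFlat]
  | cons w t ih =>
    intro seen
    have e1 : (if true = true then (1:Nat) else 0) = 1 := rfl
    have e0 : (if false = true then (1:Nat) else 0) = 0 := rfl
    simp only [pluralizeAux, List.countP_cons]
    by_cases h : w ∈ std
    · have hc : std.contains w = true := by simpa using h
      rw [hc, if_pos rfl]
      cases seen
      · rw [if_neg Bool.false_ne_true, ih true]
        simp only [e0, if_true, Nat.add_zero]
        by_cases h2 : 2 ≤ t.countP (fun w => std.contains w) + 1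
        · rw [if_pos h2, if_pos h2]
        · rw [if_neg h2, if_neg h2]
          simp [pvFlat, h]
      · rw [if_pos rfl]
        simp only [if_true]
        have hcond : 2 ≤ t.countP (fun w => std.contains w) + 1 + 1 := by omega
        rw [if_pos hcond]
    · have hc : std.contains w = false := by simpa using h
      rw [hc, if_neg Bool.false_ne_true, ih seen]
      cases seen
      · simp only [e0, Nat.add_zero]
        by_cases h2 : 2 ≤ t.countP (fun w => std.contains w)
        · rw [if_pos h2, if_pos h2]
        · rw [if_neg h2, if_neg h2]
          simp [pvFlat, h]
      · simp only [e0, if_true, Nat.add_zero]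
        by_cases h2 : 2 ≤ t.countP (fun w => std.contains w) + 1
        · rw [if_pos h2, if_pos h2]
        · rw [if_neg h2, if_neg h2]
          simp [pvFlat, h]

-- ===== VERDICT (by name: the statement is the Claim_ definition above) =====
theorem proof_tag_spec : Claim_equal_proof_tag := by
  intro tag std _
  unfold Spec_proof_tag proof_tag proof_tag_alt
  simp only []
  by_cases h1 : (PySem.Chars.splitOn tag.toList [' ']).length = 1
  · simp [h1]
  · rw [if_neg h1, if_neg h1]
    rw [foldl_eq_count_flat, pluralizeAux_eq]
    simp only [Nat.zero_add, List.nil_append, Bool.false_eq_true, if_false, Nat.add_zero]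
    by_cases h2 : 2 ≤ (PySem.Chars.splitOn tag.toList [' ']).countP
        (fun w => (std.map String.toList).contains w)
    · rw [if_pos h2, if_neg (by omega)]
    · rw [if_neg h2, if_pos (by omega)]
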